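-- pv_equiv track=rewrite | github.com/LaraibNaseem-04/CryptoVision | backend/app.py | resolve_asset
-- ===== SOURCE A (Python) =====
-- ASSETS = {
--     "bitcoin": {
--         "id": "bitcoin",
--         "name": "Bitcoin",
--         "symbol": "BTC",
--         "ticker": "BTC-USD",
--         "model_path": "../Bitcoin_Price_Prediction_Model.keras",
--         "accent": "#f7931a",
--         "training_range": "2015-01-01 to 2026-04-28",
--     },
--     "ethereum": {
--         "id": "ethereum",
--         "name": "Ethereum",
--         "symbol": "ETH",
--         "ticker": "ETH-USD",
--         "model_path": "../Etherium_Price_Prediction_Model.keras",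
--         "accent": "#627eea",
--         "training_range": "2017-01-01 to 2026-05-02",
--     },
--     "xrp": {
--         "id": "xrp",
--         "name": "XRP",
--         "symbol": "XRP",
--         "ticker": "XRP-USD",
--         "model_path": "../Ripple_Price_Prediction_Model.keras",
--         "accent": "#23292f",
--         "training_range": "2017-01-01 to 2026-05-02",
--     },
-- }
--
-- def resolve_asset(asset_value):
--     """Resolve an asset using id, symbol, or ticker."""
--     if not asset_value:
--         return ASSETS["bitcoin"]
--
--     normalized = str(asset_value).strip().lower()
--
--     for asset in ASSETS.values():
--         if normalized in {
--             asset["id"].lower(),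
--             asset["name"].lower(),
--             asset["symbol"].lower(),
--             asset["ticker"].lower(),
--         }:
--             return asset
--
--     return None
-- ===== SOURCE B (Python) =====
-- ASSETS = {
--     "bitcoin": {
--         "id": "bitcoin",
--         "name": "Bitcoin",
--         "symbol": "BTC",
--         "ticker": "BTC-USD",
--         "model_path": "../Bitcoin_Price_Prediction_Model.keras",
--         "accent": "#f7931a",
--         "training_range": "2015-01-01 to 2026-04-28",
--     },
--     "ethereum": {
--         "id": "ethereum",
--         "name": "Ethereum",
--         "symbol": "ETH",
--         "ticker": "ETH-USD",
--         "model_path": "../Etherium_Price_Prediction_Model.keras",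
--         "accent": "#627eea",
--         "training_range": "2017-01-01 to 2026-05-02",
--     },
--     "xrp": {
--         "id": "xrp",
--         "name": "XRP",
--         "symbol": "XRP",
--         "ticker": "XRP-USD",
--         "model_path": "../Ripple_Price_Prediction_Model.keras",
--         "accent": "#23292f",
--         "training_range": "2017-01-01 to 2026-05-02",
--     },
-- }
--
-- # Index built once at import time: every alias (id/name/symbol/ticker, lowered)
-- # maps straight to its asset; the per-call scan over ASSETS disappears.
-- LOOKUP = {}
-- for _asset in ASSETS.values():
--     for _key in (_asset["id"], _asset["name"], _asset["symbol"], _asset["ticker"]):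
--         LOOKUP[_key.lower()] = _asset
--
--
-- def resolve_asset(asset_value):
--     """Resolve an asset using id, symbol, or ticker."""
--     if not asset_value:
--         return ASSETS["bitcoin"]
--     normalized = str(asset_value).strip().lower()
--     return LOOKUP.get(normalized)
-- ===== Notes on version B (the rewrite author's own statement) =====
-- stated objective: simpler
-- what changed: Replaces the per-call scan over ASSETS (rebuilding a 4-element alias set for each asset) with one alias-to-asset dict built once at module level, so the function body becomes a single LOOKUP.get(normalized).
import Mathlib
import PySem

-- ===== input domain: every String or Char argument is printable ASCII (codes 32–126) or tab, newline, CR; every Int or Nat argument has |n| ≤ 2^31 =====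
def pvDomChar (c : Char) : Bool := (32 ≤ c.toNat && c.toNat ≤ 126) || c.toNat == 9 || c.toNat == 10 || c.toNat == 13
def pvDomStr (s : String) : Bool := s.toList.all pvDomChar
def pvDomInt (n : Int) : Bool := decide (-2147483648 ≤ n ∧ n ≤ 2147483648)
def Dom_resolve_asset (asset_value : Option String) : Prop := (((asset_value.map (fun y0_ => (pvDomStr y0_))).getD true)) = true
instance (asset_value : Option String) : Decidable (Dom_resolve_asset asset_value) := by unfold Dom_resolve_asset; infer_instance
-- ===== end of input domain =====

-- B builds the alias→asset index once (module level) so the per-call loop over ASSETS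
-- becomes a single dict lookup; same return value everywhere (objective: simpler).

-- ===== PORT A =====
-- shared data: the ASSETS dicts as association lists (insertion order)
def pvBTC : List (String × String) :=
  [("id","bitcoin"),("name","Bitcoin"),("symbol","BTC"),("ticker","BTC-USD"),
   ("model_path","../Bitcoin_Price_Prediction_Model.keras"),("accent","#f7931a"),
   ("training_range","2015-01-01 to 2026-04-28")]
def pvETH : List (String × String) :=
  [("id","ethereum"),("name","Ethereum"),("symbol","ETH"),("ticker","ETH-USD"),
   ("model_path","../Etherium_Price_Prediction_Model.keras"),("accent","#627eea"),
   ("training_range","2017-01-01 to 2026-05-02")]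
def pvXRP : List (String × String) :=
  [("id","xrp"),("name","XRP"),("symbol","XRP"),("ticker","XRP-USD"),
   ("model_path","../Ripple_Price_Prediction_Model.keras"),("accent","#23292f"),
   ("training_range","2017-01-01 to 2026-05-02")]
def pvAssets : List (List (String × String)) := [pvBTC, pvETH, pvXRP]

-- asset["k"]: first-match lookup; exact here since every key is present in these literal dicts
def pvGet (asset : List (String × String)) (k : String) : String :=
  ((PySem.Dict.mk asset).get? k).getD ""

-- the for-loop of A: membership of normalized in the 4-alias set of each asset in turn
def pvLoopA (normalized : String) : List (List (String × String)) → Option (List (String × String))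
  | [] => none
  | asset :: rest =>
    if PySem.Set.contains (PySem.Set.ofList
        [PySem.Str.lower (pvGet asset "id"), PySem.Str.lower (pvGet asset "name"),
         PySem.Str.lower (pvGet asset "symbol"), PySem.Str.lower (pvGet asset "ticker")]) normalized
    then some asset else pvLoopA normalized rest

def resolve_asset (asset_value : Option String) : Option (List (String × String)) :=
  match asset_value with
  | none => some pvBTC
  | some s =>
    if s = "" then some pvBTC
    else pvLoopA (PySem.Str.lower (PySem.Str.strip s)) pvAssets

-- ===== PORT B =====
-- LOOKUP: alias→asset dict built once by the module-level loop of Source B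
def pvLookup : PySem.Dict String (List (String × String)) :=
  pvAssets.foldl (fun d asset =>
    [pvGet asset "id", pvGet asset "name", pvGet asset "symbol", pvGet asset "ticker"].foldl
      (fun d k => d.insert (PySem.Str.lower k) asset) d) PySem.Dict.empty

def resolve_asset_alt (asset_value : Option String) : Option (List (String × String)) :=
  match asset_value with
  | none => some pvBTC
  | some s =>
    if s = "" then some pvBTC
    else pvLookup.get? (PySem.Str.lower (PySem.Str.strip s))

-- ===== PRECONDITION & SPEC =====
def Spec_resolve_asset (asset_value : Option String) (out : Option (List (String × String))) : Prop := out = resolve_asset_alt asset_value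
instance (asset_value : Option String) (out : Option (List (String × String))) : Decidable (Spec_resolve_asset asset_value out) := by unfold Spec_resolve_asset; infer_instance

-- ===== CLAIM (what is proved, stated in full; the proofs are below) =====
def Claim_equal_resolve_asset : Prop := ∀ (asset_value : Option String), Dom_resolve_asset asset_value → Spec_resolve_asset asset_value (resolve_asset asset_value)

-- ===== LEMMAS AND PROOFS =====
-- for any normalized string, A's scan agrees with B's one-shot index lookup
lemma pvLoop_eq_lookup (n : String) : pvLoopA n pvAssets = pvLookup.get? n := by
  by_cases h1 : n = "bitcoin"; · subst h1; decide
  by_cases h2 : n = "btc"; · subst h2; decide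
  by_cases h3 : n = "btc-usd"; · subst h3; decide
  by_cases h4 : n = "ethereum"; · subst h4; decide
  by_cases h5 : n = "eth"; · subst h5; decide
  by_cases h6 : n = "eth-usd"; · subst h6; decide
  by_cases h7 : n = "xrp"; · subst h7; decide
  by_cases h8 : n = "xrp-usd"; · subst h8; decide
  -- the alias sets and the index evaluate to literals (closed terms)
  have hS1 : PySem.Set.ofList
      [PySem.Str.lower (pvGet pvBTC "id"), PySem.Str.lower (pvGet pvBTC "name"),
       PySem.Str.lower (pvGet pvBTC "symbol"), PySem.Str.lower (pvGet pvBTC "ticker")]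
      = ["bitcoin", "btc", "btc-usd"] := by decide
  have hS2 : PySem.Set.ofList
      [PySem.Str.lower (pvGet pvETH "id"), PySem.Str.lower (pvGet pvETH "name"),
       PySem.Str.lower (pvGet pvETH "symbol"), PySem.Str.lower (pvGet pvETH "ticker")]
      = ["ethereum", "eth", "eth-usd"] := by decide
  have hS3 : PySem.Set.ofList
      [PySem.Str.lower (pvGet pvXRP "id"), PySem.Str.lower (pvGet pvXRP "name"),
       PySem.Str.lower (pvGet pvXRP "symbol"), PySem.Str.lower (pvGet pvXRP "ticker")]
      = ["xrp", "xrp-usd"] := by decide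
  have hL : pvLookup = PySem.Dict.mk
      [("bitcoin", pvBTC), ("btc", pvBTC), ("btc-usd", pvBTC),
       ("ethereum", pvETH), ("eth", pvETH), ("eth-usd", pvETH),
       ("xrp", pvXRP), ("xrp-usd", pvXRP)] := by decide
  simp only [pvLoopA, pvAssets, hS1, hS2, hS3, hL]
  simp [PySem.Set.contains, PySem.Dict.get?,
        h1, h2, h3, h4, h5, h6, h7, h8,
        Ne.symm h1, Ne.symm h2, Ne.symm h3, Ne.symm h4, Ne.symm h5, Ne.symm h6,
        Ne.symm h7, Ne.symm h8]

-- ===== VERDICT (by name: the statement is the Claim_ definition above) =====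
theorem resolve_asset_spec : Claim_equal_resolve_asset := by
  intro av _
  unfold Spec_resolve_asset resolve_asset resolve_asset_alt
  match av with
  | none => rfl
  | some s =>
    by_cases hs : s = "" <;> simp [hs, pvLoop_eq_lookup]
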